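-- pv_equiv track=rewrite | github.com/Geuan666/XAI4Agent | xai4agent/pair/token_build.py | find_marker_range_any
-- ===== SOURCE A (Python) =====
-- from typing import Any, Dict, List, Tuple
--
-- def char_range_to_token_range(
--     offsets: List[Tuple[int, int]], start_char: int, end_char: int
-- ) -> Tuple[int, int]:
--     if start_char < 0 or end_char < 0 or end_char <= start_char:
--         return -1, -1
--     start_token = -1
--     end_token = -1
--     for i, (s, e) in enumerate(offsets):
--         if e <= start_char:
--             continue
--         start_token = i
--         break
--     if start_token == -1:
--         return -1, -1
--     for i, (s, e) in enumerate(offsets):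
--         if s >= end_char:
--             end_token = i
--             break
--     if end_token == -1:
--         end_token = len(offsets)
--     return start_token, end_token
--
-- def find_marker_range(
--     text: str,
--     marker: str,
--     offsets: List[Tuple[int, int]],
--     start_char: int = 0,
-- ) -> Tuple[int, int, int, int]:
--     if start_char < 0:
--         return -1, -1, -1, -1
--     idx = text.find(marker, start_char)
--     if idx == -1:
--         return -1, -1, -1, -1
--     char_start = idx
--     char_end = idx + len(marker)
--     tok_start, tok_end = char_range_to_token_range(offsets, char_start, char_end)
--     return char_start, char_end, tok_start, tok_end
--
-- def find_marker_range_any(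
--     text: str,
--     markers: List[str],
--     offsets: List[Tuple[int, int]],
--     start_char: int = 0,
-- ) -> Tuple[int, int, int, int]:
--     for marker in markers:
--         cs, ce, ts, te = find_marker_range(text, marker, offsets, start_char)
--         if ts != -1:
--             return cs, ce, ts, te
--     return -1, -1, -1, -1
-- ===== SOURCE B (Python) =====
-- from bisect import bisect_left, bisect_right
-- from typing import List, Tuple
--
-- def find_marker_range_any(
--     text: str,
--     markers: List[str],
--     offsets: List[Tuple[int, int]],
--     start_char: int = 0,
-- ) -> Tuple[int, int, int, int]:
--     if start_char < 0:
--         return -1, -1, -1, -1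
--     # prefix maxima of the end- and start-offsets: both lists are nondecreasing,
--     # so the "first token ending after cs" / "first token starting at/after ce"
--     # scans become binary searches.
--     emax: List[int] = []
--     smax: List[int] = []
--     me = ms = None
--     for s, e in offsets:
--         me = e if me is None or e > me else me
--         ms = s if ms is None or s > ms else ms
--         emax.append(me)
--         smax.append(ms)
--     n = len(offsets)
--     for marker in markers:
--         idx = text.find(marker, start_char)
--         if idx == -1 or not marker:
--             continue
--         cs, ce = idx, idx + len(marker)
--         ts = bisect_right(emax, cs)
--         if ts == n:
--             continue
--         return cs, ce, ts, bisect_left(smax, ce)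
--     return -1, -1, -1, -1
-- ===== Notes on version B (the rewrite author's own statement) =====
-- stated objective: alternative
-- what changed: B precomputes prefix-maximum arrays of the token start/end offsets once and maps each marker's char range to its token range with two binary searches (bisect), replacing A's two linear scans over offsets per marker (intended as faster, O(m + k*(n + log m)) vs O(k*(n+m)); measured ~1.5x but not consistently above the 1.5x bar).
import Mathlib
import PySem

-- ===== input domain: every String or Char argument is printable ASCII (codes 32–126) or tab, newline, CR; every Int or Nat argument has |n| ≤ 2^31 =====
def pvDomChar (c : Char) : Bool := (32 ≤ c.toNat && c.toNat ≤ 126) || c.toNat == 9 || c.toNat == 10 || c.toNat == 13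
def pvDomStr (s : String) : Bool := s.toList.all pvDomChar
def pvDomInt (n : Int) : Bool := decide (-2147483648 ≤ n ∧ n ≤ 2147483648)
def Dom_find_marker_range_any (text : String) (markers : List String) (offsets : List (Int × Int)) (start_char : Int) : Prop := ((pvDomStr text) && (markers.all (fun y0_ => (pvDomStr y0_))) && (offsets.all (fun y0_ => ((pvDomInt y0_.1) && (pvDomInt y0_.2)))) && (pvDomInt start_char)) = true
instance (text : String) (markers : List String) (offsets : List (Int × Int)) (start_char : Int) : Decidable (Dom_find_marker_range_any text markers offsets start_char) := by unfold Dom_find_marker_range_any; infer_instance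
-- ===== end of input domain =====

-- B replaces A's per-marker linear scans over `offsets` with binary searches on
-- prefix-maximum arrays built once up front; equal return values are proved below.

-- ===== PORT A =====
-- first loop of char_range_to_token_range (enumerate with continue/break)
def pvA_startScan : List (Int × Int) → Int → Nat → Int
  | [], _, _ => -1
  | (_, e) :: rest, sc, i => if e ≤ sc then pvA_startScan rest sc (i + 1) else (i : Int)

-- second loop of char_range_to_token_range
def pvA_endScan : List (Int × Int) → Int → Nat → Int
  | [], _, _ => -1
  | (s, _) :: rest, ec, i => if s ≥ ec then (i : Int) else pvA_endScan rest ec (i + 1)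

def char_range_to_token_range (offsets : List (Int × Int)) (start_char end_char : Int) : Int × Int :=
  if start_char < 0 ∨ end_char < 0 ∨ end_char ≤ start_char then (-1, -1)
  else
    let start_token := pvA_startScan offsets start_char 0
    if start_token = -1 then (-1, -1)
    else
      let end_token := pvA_endScan offsets end_char 0
      let end_token := if end_token = -1 then (offsets.length : Int) else end_token
      (start_token, end_token)

def find_marker_range (text marker : String) (offsets : List (Int × Int)) (start_char : Int) : Int × Int × Int × Int :=
  if start_char < 0 then (-1, -1, -1, -1)
  else
    let idx := PySem.Str.findFrom text marker start_char
    if idx = -1 then (-1, -1, -1, -1)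
    else
      let char_start := idx
      let char_end := idx + PySem.Str.len marker
      let tok := char_range_to_token_range offsets char_start char_end
      (char_start, char_end, tok.1, tok.2)

-- the `for marker in markers` loop of find_marker_range_any
def pvA_loop (text : String) (offsets : List (Int × Int)) (start_char : Int) : List String → List Int
  | [] => [-1, -1, -1, -1]
  | marker :: rest =>
    let r := find_marker_range text marker offsets start_char
    if r.2.2.1 ≠ -1 then [r.1, r.2.1, r.2.2.1, r.2.2.2]
    else pvA_loop text offsets start_char rest

def find_marker_range_any (text : String) (markers : List String) (offsets : List (Int × Int)) (start_char : Int) : List Int :=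
  pvA_loop text offsets start_char markers

-- ===== PORT B =====
-- the prefix-maximum loop of Source B (me/ms start as None; lists built element by element)
def pvB_prefixMax : List (Int × Int) → Option Int → Option Int → List Int × List Int
  | [], _, _ => ([], [])
  | (s, e) :: rest, me, ms =>
    let me' := match me with | none => e | some m => if e > m then e else m
    let ms' := match ms with | none => s | some m => if s > m then s else m
    let p := pvB_prefixMax rest (some me') (some ms')
    (me' :: p.1, ms' :: p.2)

-- the `for marker in markers` loop of Source B
def pvB_loop (text : String) (start_char : Int) (emax smax : List Int) (n : Nat) : List String → List Int
  | [] => [-1, -1, -1, -1]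
  | marker :: rest =>
    let idx := PySem.Str.findFrom text marker start_char
    if idx = -1 ∨ marker.toList = [] then pvB_loop text start_char emax smax n rest
    else
      let cs := idx
      let ce := idx + PySem.Str.len marker
      let ts := PySem.List.bisectRight emax cs
      if ts = n then pvB_loop text start_char emax smax n rest
      else [cs, ce, (ts : Int), (PySem.List.bisectLeft smax ce : Int)]

def find_marker_range_any_alt (text : String) (markers : List String) (offsets : List (Int × Int)) (start_char : Int) : List Int :=
  if start_char < 0 then [-1, -1, -1, -1]
  else
    let p := pvB_prefixMax offsets none none
    pvB_loop text start_char p.1 p.2 offsets.length markers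

-- ===== PRECONDITION & SPEC =====
def Spec_find_marker_range_any (text : String) (markers : List String) (offsets : List (Int × Int)) (start_char : Int) (out : List Int) : Prop := out = find_marker_range_any_alt text markers offsets start_char
instance (text : String) (markers : List String) (offsets : List (Int × Int)) (start_char : Int) (out : List Int) : Decidable (Spec_find_marker_range_any text markers offsets start_char out) := by unfold Spec_find_marker_range_any; infer_instance

-- ===== CLAIM (what is proved, stated in full; the proofs are below) =====
def Claim_equal_find_marker_range_any : Prop := ∀ (text : String) (markers : List String) (offsets : List (Int × Int)) (start_char : Int), Dom_find_marker_range_any text markers offsets start_char → Spec_find_marker_range_any text markers offsets start_char (find_marker_range_any text markers offsets start_char)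

-- ===== LEMMAS AND PROOFS =====

-- proof-side prefix-maximum on a plain Int list, seeded with `a`
def pmaxA (a : Int) : List Int → List Int
  | [] => []
  | e :: r => (if e > a then e else a) :: pmaxA (if e > a then e else a) r

-- proof-side prefix-maximum, no seed (the `None` start)
def pmaxN : List Int → List Int
  | [] => []
  | e :: r => e :: pmaxA e r

lemma pm_fst_some (l : List (Int × Int)) (a : Int) (ms : Option Int) :
    (pvB_prefixMax l (some a) ms).1 = pmaxA a (l.map Prod.snd) := by
  induction l generalizing a ms with
  | nil => rfl
  | cons p r ih =>
    obtain ⟨s, e⟩ := p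
    simp only [pvB_prefixMax, pmaxA, List.map]
    exact congrArg _ (ih _ _)

lemma pm_fst_none (l : List (Int × Int)) (ms : Option Int) :
    (pvB_prefixMax l none ms).1 = pmaxN (l.map Prod.snd) := by
  cases l with
  | nil => rfl
  | cons p r =>
    obtain ⟨s, e⟩ := p
    simp only [pvB_prefixMax, pmaxN, List.map]
    exact congrArg _ (pm_fst_some r e _)

lemma pm_snd_some (l : List (Int × Int)) (a : Int) (me : Option Int) :
    (pvB_prefixMax l me (some a)).2 = pmaxA a (l.map Prod.fst) := by
  induction l generalizing a me with
  | nil => rfl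
  | cons p r ih =>
    obtain ⟨s, e⟩ := p
    simp only [pvB_prefixMax, pmaxA, List.map]
    exact congrArg _ (ih _ _)

lemma pm_snd_none (l : List (Int × Int)) (me : Option Int) :
    (pvB_prefixMax l me none).2 = pmaxN (l.map Prod.fst) := by
  cases l with
  | nil => rfl
  | cons p r =>
    obtain ⟨s, e⟩ := p
    simp only [pvB_prefixMax, pmaxN, List.map]
    exact congrArg _ (pm_snd_some r s _)

lemma pmaxA_length (a : Int) (es : List Int) : (pmaxA a es).length = es.length := by
  induction es generalizing a with
  | nil => rfl
  | cons e r ih => simp [pmaxA, ih]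

lemma pmaxN_length (es : List Int) : (pmaxN es).length = es.length := by
  cases es with
  | nil => rfl
  | cons e r => simp [pmaxN, pmaxA_length]

lemma pmaxA_le (a : Int) (es : List Int) : ∀ y ∈ pmaxA a es, a ≤ y := by
  induction es generalizing a with
  | nil => simp [pmaxA]
  | cons e r ih =>
    intro y hy
    simp only [pmaxA, List.mem_cons] at hy
    rcases hy with h | h
    · subst h; split <;> omega
    · have := ih (if e > a then e else a) y h
      split at this <;> omega

lemma pmaxA_pairwise (a : Int) (es : List Int) :
    List.Pairwise (fun x1 x2 => x1 ≤ x2) (a :: pmaxA a es) := by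
  induction es generalizing a with
  | nil => simp [pmaxA]
  | cons e r ih =>
    simp only [pmaxA]
    refine List.Pairwise.cons ?_ (ih _)
    intro y hy
    simp only [List.mem_cons] at hy
    rcases hy with h | h
    · subst h; split <;> omega
    · have := pmaxA_le (if e > a then e else a) r y h
      split at this <;> omega

lemma pmaxN_pairwise (es : List Int) :
    List.Pairwise (fun x1 x2 => x1 ≤ x2) (pmaxN es) := by
  cases es with
  | nil => simp [pmaxN]
  | cons e r => exact pmaxA_pairwise e r

lemma pmaxA_ub (a : Int) (es : List Int) (j : Nat) (hj : j < es.length) :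
    es[j] ≤ (pmaxA a es)[j]'(by rw [pmaxA_length]; exact hj) := by
  induction es generalizing a j with
  | nil => simp at hj
  | cons e r ih =>
    cases j with
    | zero => simp only [pmaxA, List.getElem_cons_zero]; split <;> omega
    | succ j =>
      simp only [pmaxA, List.getElem_cons_succ]
      exact ih _ _ (by simpa using hj)

lemma pmaxN_ub (es : List Int) (j : Nat) (hj : j < es.length) :
    es[j] ≤ (pmaxN es)[j]'(by rw [pmaxN_length]; exact hj) := by
  cases es with
  | nil => simp at hj
  | cons e r =>
    cases j with
    | zero => simp [pmaxN]
    | succ j =>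
      simp only [pmaxN, List.getElem_cons_succ]
      exact pmaxA_ub e r j (by simpa using hj)

lemma pmaxA_first (a : Int) (es : List Int) (j : Nat) (hj : j < es.length) (x : Int)
    (ha : a ≤ x) (hlt : ∀ i, (hi : i < j) → es[i]'(by omega) ≤ x)
    (hx : x < (pmaxA a es)[j]'(by rw [pmaxA_length]; exact hj)) : x < es[j] := by
  induction es generalizing a j with
  | nil => simp at hj
  | cons e r ih =>
    cases j with
    | zero =>
      simp only [pmaxA, List.getElem_cons_zero] at hx ⊢
      split at hx <;> omega
    | succ j =>
      simp only [pmaxA, List.getElem_cons_succ] at hx ⊢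
      have he : e ≤ x := by simpa using hlt 0 (by omega)
      refine ih _ j (by simpa using hj) ?_ ?_ hx
      · split <;> omega
      · intro i hi; simpa using hlt (i + 1) (by omega)

lemma pmaxN_first (es : List Int) (j : Nat) (hj : j < es.length) (x : Int)
    (hlt : ∀ i, (hi : i < j) → es[i]'(by omega) ≤ x)
    (hx : x < (pmaxN es)[j]'(by rw [pmaxN_length]; exact hj)) : x < es[j] := by
  cases es with
  | nil => simp at hj
  | cons e r =>
    cases j with
    | zero => simpa [pmaxN] using hx
    | succ j =>
      simp only [pmaxN, List.getElem_cons_succ] at hx ⊢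
      have he : e ≤ x := by simpa using hlt 0 (by omega)
      refine pmaxA_first e r j (by simpa using hj) x he ?_ hx
      intro i hi; simpa using hlt (i + 1) (by omega)

-- A's first scan, characterised by the first index r whose end-offset exceeds sc
lemma pvA_startScan_eq (l : List (Int × Int)) (sc : Int) (i r : Nat) (hr : r ≤ l.length)
    (hbefore : ∀ j, (hj : j < r) → (l[j]'(by omega)).2 ≤ sc)
    (hat : ∀ (h : r < l.length), sc < (l[r]'h).2) :
    pvA_startScan l sc i = if r = l.length then -1 else ((i : Int) + r) := by
  induction l generalizing i r with
  | nil => simp only [List.length_nil] at hr; simp [pvA_startScan, Nat.le_zero.mp hr]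
  | cons p t ih =>
    obtain ⟨s, e⟩ := p
    cases r with
    | zero =>
      have : sc < e := by simpa using hat (by simp)
      simp only [pvA_startScan, if_neg (by omega : ¬ e ≤ sc)]
      simp
    | succ r =>
      have he : e ≤ sc := by simpa using hbefore 0 (by omega)
      simp only [pvA_startScan, if_pos he]
      have := ih (i + 1) r (by simpa using hr)
        (fun j hj => by simpa using hbefore (j + 1) (by omega))
        (fun h => by simpa using hat (by simpa using h))
      rw [this]
      by_cases hc : r = t.length
      · simp [hc]
      · rw [if_neg hc, if_neg (by simpa using hc)]
        push_cast; ring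

-- A's second scan, characterised by the first index r whose start-offset reaches ec
lemma pvA_endScan_eq (l : List (Int × Int)) (ec : Int) (i r : Nat) (hr : r ≤ l.length)
    (hbefore : ∀ j, (hj : j < r) → (l[j]'(by omega)).1 < ec)
    (hat : ∀ (h : r < l.length), ec ≤ (l[r]'h).1) :
    pvA_endScan l ec i = if r = l.length then -1 else ((i : Int) + r) := by
  induction l generalizing i r with
  | nil => simp only [List.length_nil] at hr; simp [pvA_endScan, Nat.le_zero.mp hr]
  | cons p t ih =>
    obtain ⟨s, e⟩ := p
    cases r with
    | zero =>
      have : ec ≤ s := by simpa using hat (by simp)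
      simp only [pvA_endScan, if_pos (by omega : s ≥ ec)]
      simp
    | succ r =>
      have hs : s < ec := by simpa using hbefore 0 (by omega)
      simp only [pvA_endScan, if_neg (by omega : ¬ s ≥ ec)]
      have := ih (i + 1) r (by simpa using hr)
        (fun j hj => by simpa using hbefore (j + 1) (by omega))
        (fun h => by simpa using hat (by simpa using h))
      rw [this]
      by_cases hc : r = t.length
      · simp [hc]
      · rw [if_neg hc, if_neg (by simpa using hc)]
        push_cast; ring

-- the char→token mapping: A's two scans agree with B's two binary searches
lemma char_range_eq (offsets : List (Int × Int)) (cs ce : Int) (h0 : 0 ≤ cs) (hlt : cs < ce) :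
    char_range_to_token_range offsets cs ce =
      (if PySem.List.bisectRight (pvB_prefixMax offsets none none).1 cs = offsets.length
       then (-1, -1)
       else ((PySem.List.bisectRight (pvB_prefixMax offsets none none).1 cs : Int),
             (PySem.List.bisectLeft (pvB_prefixMax offsets none none).2 ce : Int))) := by
  have hes : (pvB_prefixMax offsets none none).1 = pmaxN (offsets.map Prod.snd) :=
    pm_fst_none offsets none
  have hss : (pvB_prefixMax offsets none none).2 = pmaxN (offsets.map Prod.fst) :=
    pm_snd_none offsets none
  set es := offsets.map Prod.snd with hesdef
  set ss := offsets.map Prod.fst with hssdef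
  have hlen_es : es.length = offsets.length := by simp [hesdef]
  have hlen_ss : ss.length = offsets.length := by simp [hssdef]
  have hElen : (pmaxN es).length = offsets.length := by rw [pmaxN_length, hlen_es]
  have hSlen : (pmaxN ss).length = offsets.length := by rw [pmaxN_length, hlen_ss]
  -- bisectRight facts
  obtain ⟨hts_le, hts_lt, hts_gt⟩ :=
    PySem.List.bisectRight_spec (pmaxN es) cs (pmaxN_pairwise es)
  set ts := PySem.List.bisectRight (pmaxN es) cs with htsdef
  obtain ⟨hte_le, hte_lt, hte_gt⟩ :=
    PySem.List.bisectLeft_spec (pmaxN ss) ce (pmaxN_pairwise ss)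
  set te := PySem.List.bisectLeft (pmaxN ss) ce with htedef
  -- translate to facts about the raw offsets
  have hts_le' : ts ≤ offsets.length := by rwa [hElen] at hts_le
  have hte_le' : te ≤ offsets.length := by rwa [hSlen] at hte_le
  have hbefore_e : ∀ j, (hj : j < ts) → (offsets[j]'(by omega)).2 ≤ cs := by
    intro j hj
    have hjlen : j < es.length := by omega
    have h1 := pmaxN_ub es j hjlen
    have h2 := hts_lt j (by rwa [pmaxN_length]) hj
    have : es[j]'hjlen = (offsets[j]'(by omega)).2 := by simp [hesdef]
    omega
  have hat_e : ∀ (h : ts < offsets.length), cs < (offsets[ts]'h).2 := by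
    intro h
    have hlen : ts < es.length := by omega
    have h2 := hts_gt ts (by rwa [pmaxN_length]) (le_refl _)
    have := pmaxN_first es ts hlen cs
      (fun i hi => by
        have := hbefore_e i hi
        have : es[i]'(by omega) = (offsets[i]'(by omega)).2 := by simp [hesdef]
        omega)
      h2
    have heq : es[ts]'hlen = (offsets[ts]'h).2 := by simp [hesdef]
    omega
  have hbefore_s : ∀ j, (hj : j < te) → (offsets[j]'(by omega)).1 < ce := by
    intro j hj
    have hjlen : j < ss.length := by omega
    have h1 := pmaxN_ub ss j hjlen
    have h2 := hte_lt j (by rwa [pmaxN_length]) hj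
    have : ss[j]'hjlen = (offsets[j]'(by omega)).1 := by simp [hssdef]
    omega
  have hat_s : ∀ (h : te < offsets.length), ce ≤ (offsets[te]'h).1 := by
    intro h
    have hlen : te < ss.length := by omega
    have h2 := hte_gt te (by rwa [pmaxN_length]) (le_refl _)
    have := pmaxN_first ss te hlen (ce - 1)
      (fun i hi => by
        have := hbefore_s i hi
        have : ss[i]'(by omega) = (offsets[i]'(by omega)).1 := by simp [hssdef]
        omega)
      (by omega)
    have heq : ss[te]'hlen = (offsets[te]'h).1 := by simp [hssdef]
    omega
  have hstart := pvA_startScan_eq offsets cs 0 ts hts_le' hbefore_e hat_e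
  have hend := pvA_endScan_eq offsets ce 0 te hte_le' hbefore_s hat_s
  rw [hes, hss, ← htsdef, ← htedef]
  unfold char_range_to_token_range
  rw [if_neg (by omega)]
  simp only [hstart, hend, Nat.cast_zero, zero_add]
  by_cases hc : ts = offsets.length
  · simp [hc]
  · have hts' : ¬ ((ts : Int) = -1) := by omega
    have hte' : ¬ ((te : Int) = -1) := by omega
    rw [if_neg hc, if_neg hts']
    by_cases hc2 : te = offsets.length
    · simp [hc2, hc]
    · rw [if_neg hc2, if_neg hte', if_neg hc]

-- a hit of text.find(marker, k) with k ≥ 0 is a nonnegative index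
lemma findFrom_cases (s sub : String) (k : Int) (hk : 0 ≤ k) :
    PySem.Str.findFrom s sub k = -1 ∨ 0 ≤ PySem.Str.findFrom s sub k := by
  simp only [PySem.Str.findFrom, PySem.Chars.findFrom, if_neg (by omega : ¬ k < 0)]
  split
  · left; rfl
  · split
    · left; rfl
    · right
      have := PySem.Chars.neg_one_le_find
        (List.drop k.toNat (List.take (↑s.toList.length : Int).toNat s.toList)) sub.toList
      omega

-- the marker loops of A and B agree (nonnegative start_char)
lemma loop_eq (text : String) (offsets : List (Int × Int)) (sc : Int) (hsc : 0 ≤ sc)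
    (markers : List String) :
    pvA_loop text offsets sc markers =
      pvB_loop text sc (pvB_prefixMax offsets none none).1
        (pvB_prefixMax offsets none none).2 offsets.length markers := by
  induction markers with
  | nil => rfl
  | cons m rest ih =>
    simp only [pvA_loop, pvB_loop, find_marker_range, if_neg (by omega : ¬ sc < 0)]
    by_cases hidx : PySem.Str.findFrom text m sc = -1
    · rw [if_pos hidx, if_pos (Or.inl hidx)]
      simp [ih]
    · rw [if_neg hidx]
      have h0 : 0 ≤ PySem.Str.findFrom text m sc := (findFrom_cases text m sc hsc).resolve_left hidx
      by_cases hm : m.toList = []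
      · rw [if_pos (Or.inr hm)]
        have hlen : PySem.Str.len m = 0 := by simp [PySem.Str.len, hm]
        have hcr : (char_range_to_token_range offsets (PySem.Str.findFrom text m sc)
            (PySem.Str.findFrom text m sc + PySem.Str.len m)).1 = -1 := by
          rw [hlen, add_zero]
          unfold char_range_to_token_range
          rw [if_pos (Or.inr (Or.inr (le_refl _)))]
        rw [hcr]
        simp [ih]
    -- nonempty marker, found: A's token mapping equals B's binary searches
      · rw [if_neg (not_or.mpr ⟨hidx, hm⟩)]
        have hlen : 0 < PySem.Str.len m := by
          simp only [PySem.Str.len]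
          have : 0 < m.toList.length := List.length_pos_of_ne_nil hm
          omega
        have hcr := char_range_eq offsets (PySem.Str.findFrom text m sc)
          (PySem.Str.findFrom text m sc + PySem.Str.len m) h0 (by omega)
        by_cases hts : PySem.List.bisectRight (pvB_prefixMax offsets none none).1
            (PySem.Str.findFrom text m sc) = offsets.length
        · rw [if_pos hts] at hcr
          rw [if_pos hts, hcr]
          simp [ih]
        · rw [if_neg hts] at hcr
          rw [if_neg hts, hcr]
          simp

-- start_char < 0: every find_marker_range call returns (-1,-1,-1,-1)
lemma loop_neg (text : String) (offsets : List (Int × Int)) (sc : Int) (hsc : sc < 0)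
    (markers : List String) : pvA_loop text offsets sc markers = [-1, -1, -1, -1] := by
  induction markers with
  | nil => rfl
  | cons m rest ih =>
    simp [pvA_loop, find_marker_range, if_pos hsc, ih]

-- ===== VERDICT (by name: the statement is the Claim_ definition above) =====
theorem find_marker_range_any_spec : Claim_equal_find_marker_range_any := by
  intro text markers offsets start_char _
  unfold Spec_find_marker_range_any find_marker_range_any find_marker_range_any_alt
  by_cases hsc : start_char < 0
  · rw [if_pos hsc, loop_neg text offsets start_char hsc markers]
  · rw [if_neg hsc]
    exact loop_eq text offsets start_char (by omega) markers
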